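-- pv_equiv track=rewrite | github.com/Vlad-2299/Sudoku | driver.py | setUnitSet
-- ===== SOURCE A (Python) =====
-- def setUnitSet(sudoku):
--     i = 1
--     const = list()
--
--     while i < 10:
--         row = list(rowVal for rowVal in sudoku if not rowVal.find(chr(64 + i)))
--         const.append(row)
--         i += 1
--
--     j = 1
--     while j < 10:
--         col = list(rowVal for rowVal in sudoku if rowVal.find(str(j)) == 1)
--         const.append(col)
--         j += 1
--
--     const.append(['A1', 'A2', 'A3', 'B1', 'B2', 'B3', 'C1', 'C2', 'C3'])
--     const.append(['A4', 'A5', 'A6', 'B4', 'B5', 'B6', 'C4', 'C5', 'C6'])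
--     const.append(['A7', 'A8', 'A9', 'B7', 'B8', 'B9', 'C7', 'C8', 'C9'])
--     const.append(['D1', 'D2', 'D3', 'E1', 'E2', 'E3', 'F1', 'F2', 'F3'])
--     const.append(['D4', 'D5', 'D6', 'E4', 'E5', 'E6', 'F4', 'F5', 'F6'])
--     const.append(['D7', 'D8', 'D9', 'E7', 'E8', 'E9', 'F7', 'F8', 'F9'])
--     const.append(['G1', 'G2', 'G3', 'H1', 'H2', 'H3', 'I1', 'I2', 'I3'])
--     const.append(['G4', 'G5', 'G6', 'H4', 'H5', 'H6', 'I4', 'I5', 'I6'])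
--     const.append(['G7', 'G8', 'G9', 'H7', 'H8', 'H9', 'I7', 'I8', 'I9'])
--
--     return const
-- ===== SOURCE B (Python) =====
-- def setUnitSet(sudoku):
--     # One pass: bucket each cell by its first character (its row letter) and,
--     # when it has one, by its second character (its column digit); then emit
--     # the nine row buckets, the nine column buckets, and the nine 3x3 boxes.
--     rows = {}
--     cols = {}
--     for cell in sudoku:
--         if cell:
--             rows.setdefault(cell[0], []).append(cell)
--             if len(cell) > 1:
--                 cols.setdefault(cell[1], []).append(cell)
--     const = [rows.get(r, []) for r in "ABCDEFGHI"]
--     const += [cols.get(d, []) for d in "123456789"]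
--     for band in ("ABC", "DEF", "GHI"):
--         for stack in ("123", "456", "789"):
--             const.append([r + d for r in band for d in stack])
--     return const
-- ===== Notes on version B (the rewrite author's own statement) =====
-- stated objective: faster
-- what changed: Replaces A's 18 separate filtering passes over sudoku (one per row letter, one per column digit) by a single bucketing pass into ordered row/column dicts keyed by a cell's first/second character, and generates the nine box lists instead of hardcoding them.
-- intended difference: On lists containing a cell whose first two characters are the same digit (e.g. '11'), A's find(str(j))==1 column test sees the digit already at index 0 and drops the cell from its column group, while B buckets it into the column of its second character, which is the intended column grouping. — e.g. on setUnitSet(["11"]): A returns [[], [], [], [], [], [], [], [], [], [], [], [], [], [], [], [], [], [], ["A1", "A2", "A3", "B1", "B2", "B3", "C1", "C2…, B returns [[], [], [], [], [], [], [], [], [], ["11"], [], [], [], [], [], [], [], [], ["A1", "A2", "A3", "B1", "B2", "B3", "C1",…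
import Mathlib
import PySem

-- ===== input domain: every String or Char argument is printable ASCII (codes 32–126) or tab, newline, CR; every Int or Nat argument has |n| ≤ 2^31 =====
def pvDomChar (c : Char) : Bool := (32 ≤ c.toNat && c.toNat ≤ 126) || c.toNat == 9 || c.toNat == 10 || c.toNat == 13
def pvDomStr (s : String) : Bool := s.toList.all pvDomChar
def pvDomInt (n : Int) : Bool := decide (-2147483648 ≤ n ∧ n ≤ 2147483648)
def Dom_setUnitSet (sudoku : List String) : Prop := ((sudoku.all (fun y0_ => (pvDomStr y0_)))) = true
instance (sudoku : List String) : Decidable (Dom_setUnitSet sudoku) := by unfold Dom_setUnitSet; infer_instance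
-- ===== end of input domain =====

-- B replaces A's 18 filtering passes over `sudoku` by one bucketing pass and generates the box lists (objective: faster, constant factor).

-- ===== PORT A =====
-- the two `while` loops (i = 1; while i < 10: …; i += 1) are ported as folds over range(1, 10);
-- chr(64 + i) is ported by hand as Char.ofNat (64 + i).toNat, exact for 0 ≤ 64 + i (always here);
-- Python's `not rowVal.find(ch)` (int truthiness) is `find … == 0`.
def setUnitSet (sudoku : List String) : List (List String) :=
  let const : List (List String) := []
  let const := (PySem.List.pyRange 1 10 1).foldl (fun const i =>
    const ++ [sudoku.filter (fun rowVal =>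
      PySem.Str.find rowVal (String.ofList [Char.ofNat (64 + i).toNat]) == 0)]) const
  let const := (PySem.List.pyRange 1 10 1).foldl (fun const j =>
    const ++ [sudoku.filter (fun rowVal =>
      PySem.Str.find rowVal (PySem.Int.toStr j) == 1)]) const
  const ++
    [["A1", "A2", "A3", "B1", "B2", "B3", "C1", "C2", "C3"],
     ["A4", "A5", "A6", "B4", "B5", "B6", "C4", "C5", "C6"],
     ["A7", "A8", "A9", "B7", "B8", "B9", "C7", "C8", "C9"],
     ["D1", "D2", "D3", "E1", "E2", "E3", "F1", "F2", "F3"],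
     ["D4", "D5", "D6", "E4", "E5", "E6", "F4", "F5", "F6"],
     ["D7", "D8", "D9", "E7", "E8", "E9", "F7", "F8", "F9"],
     ["G1", "G2", "G3", "H1", "H2", "H3", "I1", "I2", "I3"],
     ["G4", "G5", "G6", "H4", "H5", "H6", "I4", "I5", "I6"],
     ["G7", "G8", "G9", "H7", "H8", "H9", "I7", "I8", "I9"]]

-- ===== PORT B =====
-- one pass: rows.setdefault(cell[0], []).append(cell); cols.setdefault(cell[1], []).append(cell);
-- then rows 'A'..'I', columns '1'..'9', and the generated 3x3 boxes ([r + d for r in band for d in stack]).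
def setUnitSet_alt (sudoku : List String) : List (List String) :=
  let dicts := sudoku.foldl
    (fun (rc : PySem.Dict Char (List String) × PySem.Dict Char (List String)) cell =>
      match cell.toList with
      | [] => rc
      | [c0] => (rc.1.modify c0 [] (· ++ [cell]), rc.2)
      | c0 :: c1 :: _ => (rc.1.modify c0 [] (· ++ [cell]), rc.2.modify c1 [] (· ++ [cell])))
    (PySem.Dict.empty, PySem.Dict.empty)
  ("ABCDEFGHI".toList.map fun r => dicts.1.getD r []) ++
  ("123456789".toList.map fun d => dicts.2.getD d []) ++
  (["ABC", "DEF", "GHI"].flatMap fun band => ["123", "456", "789"].map fun stack =>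
    band.toList.flatMap fun r => stack.toList.map fun d => String.ofList [r, d])

-- ===== PRECONDITION & SPEC =====
def pvDoubledDigit (s : String) : Bool :=
  match s.toList with
  | c0 :: c1 :: _ => c0 == c1 && ['1','2','3','4','5','6','7','8','9'].contains c1
  | _ => false

-- On lists containing a cell whose first two characters are the same digit (e.g. '11'), A's
-- first-occurrence column test find(str(j)) == 1 sees the digit already at index 0 and drops the
-- cell from its column group, while B buckets by the character at position 1 and keeps it there;
-- B's positional bucketing is the intended column grouping.
def D_setUnitSet (sudoku : List String) : Prop := sudoku.any pvDoubledDigit = true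
instance (sudoku : List String) : Decidable (D_setUnitSet sudoku) := by unfold D_setUnitSet; infer_instance

def Spec_setUnitSet (sudoku : List String) (out : List (List String)) : Prop := ¬ D_setUnitSet sudoku → out = setUnitSet_alt sudoku
instance (sudoku : List String) (out : List (List String)) : Decidable (Spec_setUnitSet sudoku out) := by unfold Spec_setUnitSet; infer_instance

def pvDiffWitness_setUnitSet : List String := ["11"]
def pvDiffWitnessOut_setUnitSet : (List (List String)) × (List (List String)) :=
  ([[], [], [], [], [], [], [], [], [], [], [], [], [], [], [], [], [], [], ["A1", "A2", "A3", "B1", "B2", "B3", "C1", "C2", "C3"], ["A4", "A5", "A6", "B4", "B5", "B6", "C4", "C5", "C6"], ["A7", "A8", "A9", "B7", "B8", "B9", "C7", "C8", "C9"], ["D1", "D2", "D3", "E1", "E2", "E3", "F1", "F2", "F3"], ["D4", "D5", "D6", "E4", "E5", "E6", "F4", "F5", "F6"], ["D7", "D8", "D9", "E7", "E8", "E9", "F7", "F8", "F9"], ["G1", "G2", "G3", "H1", "H2", "H3", "I1", "I2", "I3"], ["G4", "G5", "G6", "H4", "H5", "H6", "I4", "I5", "I6"], ["G7", "G8", "G9",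 "H7", "H8", "H9", "I7", "I8", "I9"]],
   [[], [], [], [], [], [], [], [], [], ["11"], [], [], [], [], [], [], [], [], ["A1", "A2", "A3", "B1", "B2", "B3", "C1", "C2", "C3"], ["A4", "A5", "A6", "B4", "B5", "B6", "C4", "C5", "C6"], ["A7", "A8", "A9", "B7", "B8", "B9", "C7", "C8", "C9"], ["D1", "D2", "D3", "E1", "E2", "E3", "F1", "F2", "F3"], ["D4", "D5", "D6", "E4", "E5", "E6", "F4", "F5", "F6"], ["D7", "D8", "D9", "E7", "E8", "E9", "F7", "F8", "F9"], ["G1", "G2", "G3", "H1", "H2", "H3", "I1", "I2", "I3"], ["G4", "G5", "G6", "H4", "H5", "H6", "I4", "I5", "I6"], ["G7", "G8", "G9", "H7", "H8", "H9", "I7", "I8", "I9"]])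

-- ===== CLAIM (what is proved, stated in full; the proofs are below) =====
def Claim_unchanged_setUnitSet : Prop := ∀ (sudoku : List String), Dom_setUnitSet sudoku → Spec_setUnitSet sudoku (setUnitSet sudoku)
def Claim_changed_setUnitSet : Prop := Dom_setUnitSet (pvDiffWitness_setUnitSet) ∧ D_setUnitSet (pvDiffWitness_setUnitSet) ∧ setUnitSet (pvDiffWitness_setUnitSet) = pvDiffWitnessOut_setUnitSet.1 ∧ setUnitSet_alt (pvDiffWitness_setUnitSet) = pvDiffWitnessOut_setUnitSet.2 ∧ pvDiffWitnessOut_setUnitSet.1 ≠ pvDiffWitnessOut_setUnitSet.2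
def Claim_exact_setUnitSet : Prop := ∀ (sudoku : List String), Dom_setUnitSet sudoku → D_setUnitSet sudoku → setUnitSet sudoku ≠ setUnitSet_alt sudoku

-- ===== LEMMAS AND PROOFS =====

-- proof-side key functions: which bucket each cell belongs to
def pvKeyRow (s : String) : Option Char := s.toList.head?
def pvKeyColA (s : String) : Option Char :=
  match s.toList with
  | c0 :: c1 :: _ => if c0 ≠ c1 then some c1 else none
  | _ => none
def pvKeyColB (s : String) : Option Char :=
  match s.toList with
  | _ :: c1 :: _ => some c1
  | _ => none

def pvUpd (key? : String → Option Char)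
    (d : PySem.Dict Char (List String)) (s : String) : PySem.Dict Char (List String) :=
  match key? s with
  | some k => d.modify k [] (· ++ [s])
  | none => d

def pvLetters : List Char := ['A','B','C','D','E','F','G','H','I']
def pvDigits : List Char := ['1','2','3','4','5','6','7','8','9']
def pvBoxL : List (List String) :=
  [["A1", "A2", "A3", "B1", "B2", "B3", "C1", "C2", "C3"],
   ["A4", "A5", "A6", "B4", "B5", "B6", "C4", "C5", "C6"],
   ["A7", "A8", "A9", "B7", "B8", "B9", "C7", "C8", "C9"],
   ["D1", "D2", "D3", "E1", "E2", "E3", "F1", "F2", "F3"],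
   ["D4", "D5", "D6", "E4", "E5", "E6", "F4", "F5", "F6"],
   ["D7", "D8", "D9", "E7", "E8", "E9", "F7", "F8", "F9"],
   ["G1", "G2", "G3", "H1", "H2", "H3", "I1", "I2", "I3"],
   ["G4", "G5", "G6", "H4", "H5", "H6", "I4", "I5", "I6"],
   ["G7", "G8", "G9", "H7", "H8", "H9", "I7", "I8", "I9"]]

lemma pv_bucket (key? : String → Option Char) (l : List String)
    (d : PySem.Dict Char (List String)) (c : Char) :
    (l.foldl (pvUpd key?) d).getD c []
    = d.getD c [] ++ l.filter (fun s => key? s == some c) := by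
  induction l generalizing d with
  | nil => simp
  | cons s t ih =>
    simp only [List.foldl_cons, List.filter_cons, pvUpd]
    cases h : key? s with
    | none => simp [ih]
    | some k =>
      rw [ih]
      by_cases hc : k = c
      · subst hc; simp
      · simp [PySem.Dict.getD_modify, hc, Ne.symm hc]

lemma pv_singleton_prefix (c : Char) (l : List Char) : [c] <+: l ↔ l.head? = some c := by
  constructor
  · rintro ⟨t, rfl⟩; rfl
  · intro h
    rcases l with _ | ⟨a, t⟩
    · simp at h
    · simp at h; subst h; exact ⟨t, rfl⟩

lemma pv_find_eq_zero (c : Char) (l : List Char) :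
    PySem.Chars.find l [c] = 0 ↔ l.head? = some c := by
  rw [← pv_singleton_prefix]
  constructor
  · intro h
    have h0 : (0 : Int) ≤ PySem.Chars.find l [c] := by omega
    have := (PySem.Chars.find_spec h0).1
    rw [h] at this; simpa using this
  · intro h
    have hinf : (0 : Int) ≤ PySem.Chars.find l [c] :=
      (PySem.Chars.find_nonneg_iff l [c]).2 (h.isInfix)
    rcases PySem.Chars.find_spec hinf with ⟨_, hmin⟩
    by_contra hne
    have : (PySem.Chars.find l [c]).toNat ≠ 0 := by omega
    exact hmin 0 (by omega) (by simpa using h)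

lemma pv_find_eq_one (c : Char) (l : List Char) :
    PySem.Chars.find l [c] = 1 ↔ [c] <+: l.drop 1 ∧ ¬ [c] <+: l := by
  constructor
  · intro h
    have h0 : (0 : Int) ≤ PySem.Chars.find l [c] := by omega
    rcases PySem.Chars.find_spec h0 with ⟨hpre, hmin⟩
    rw [h] at hpre hmin
    exact ⟨hpre, hmin 0 (by omega)⟩
  · rintro ⟨h1, h0⟩
    have hinf : (0 : Int) ≤ PySem.Chars.find l [c] :=
      (PySem.Chars.find_nonneg_iff l [c]).2 (h1.isInfix.trans (l.drop_suffix 1).isInfix)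
    rcases PySem.Chars.find_spec hinf with ⟨hpre, hmin⟩
    have hne0 : (PySem.Chars.find l [c]).toNat ≠ 0 := by
      intro h; rw [h] at hpre; exact h0 (by simpa using hpre)
    have hle1 : (PySem.Chars.find l [c]).toNat ≤ 1 := by
      by_contra hgt; exact hmin 1 (by omega) h1
    omega

lemma pv_row_pred (c : Char) (s : String) :
    (PySem.Str.find s (String.ofList [c]) == 0) = (pvKeyRow s == some c) := by
  rw [Bool.eq_iff_iff]
  simp only [beq_iff_eq, PySem.Str.find_eq, pvKeyRow]
  simpa using pv_find_eq_zero c s.toList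

lemma pv_col_pred (c : Char) (s : String) :
    (PySem.Str.find s (String.ofList [c]) == 1) = (pvKeyColA s == some c) := by
  rw [Bool.eq_iff_iff]
  simp only [beq_iff_eq, PySem.Str.find_eq, pvKeyColA]
  rw [show (String.ofList [c]).toList = [c] from by simp, pv_find_eq_one]
  rcases h : s.toList with _ | ⟨a, _ | ⟨b, t⟩⟩ <;> simp
  by_cases hab : a = b <;> simp [hab] <;> aesop

-- canonical forms of the two ports: rows ++ columns ++ boxes, the columns keyed by pvKeyColA / pvKeyColB
lemma pv_A_canon (sudoku : List String) :
    setUnitSet sudoku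
      = pvLetters.map (fun r => sudoku.filter (fun s => pvKeyRow s == some r))
        ++ (pvDigits.map (fun d => sudoku.filter (fun s => pvKeyColA s == some d)) ++ pvBoxL) := by
  simp only [setUnitSet]
  simp only [PySem.List.foldl_append_singleton_eq_map,
    show PySem.List.pyRange 1 10 1 = [1,2,3,4,5,6,7,8,9] from by decide]
  simp only [List.map_cons, List.map_nil, List.nil_append]
  simp only [show PySem.Int.toStr 1 = String.ofList ['1'] from rfl,
    show PySem.Int.toStr 2 = String.ofList ['2'] from rfl,
    show PySem.Int.toStr 3 = String.ofList ['3'] from rfl,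
    show PySem.Int.toStr 4 = String.ofList ['4'] from rfl,
    show PySem.Int.toStr 5 = String.ofList ['5'] from rfl,
    show PySem.Int.toStr 6 = String.ofList ['6'] from rfl,
    show PySem.Int.toStr 7 = String.ofList ['7'] from rfl,
    show PySem.Int.toStr 8 = String.ofList ['8'] from rfl,
    show PySem.Int.toStr 9 = String.ofList ['9'] from rfl,
    show Char.ofNat ((64:Int) + 1).toNat = 'A' from rfl,
    show Char.ofNat ((64:Int) + 2).toNat = 'B' from rfl,
    show Char.ofNat ((64:Int) + 3).toNat = 'C' from rfl,
    show Char.ofNat ((64:Int) + 4).toNat = 'D' from rfl,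
    show Char.ofNat ((64:Int) + 5).toNat = 'E' from rfl,
    show Char.ofNat ((64:Int) + 6).toNat = 'F' from rfl,
    show Char.ofNat ((64:Int) + 7).toNat = 'G' from rfl,
    show Char.ofNat ((64:Int) + 8).toNat = 'H' from rfl,
    show Char.ofNat ((64:Int) + 9).toNat = 'I' from rfl]
  simp only [pv_row_pred, pv_col_pred, pvLetters, pvDigits, pvBoxL,
    List.map_cons, List.map_nil, List.cons_append, List.nil_append]

lemma pv_B_canon (sudoku : List String) :
    setUnitSet_alt sudoku
      = pvLetters.map (fun r => sudoku.filter (fun s => pvKeyRow s == some r))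
        ++ (pvDigits.map (fun d => sudoku.filter (fun s => pvKeyColB s == some d)) ++ pvBoxL) := by
  simp only [setUnitSet_alt]
  rw [show (["ABC", "DEF", "GHI"].flatMap fun band => ["123", "456", "789"].map fun stack =>
      band.toList.flatMap fun r => stack.toList.map fun d => String.ofList [r, d]) = pvBoxL from by decide]
  have hsplit : (fun (rc : PySem.Dict Char (List String) × PySem.Dict Char (List String)) (cell : String) =>
      match cell.toList with
      | [] => rc
      | [c0] => (rc.1.modify c0 [] (· ++ [cell]), rc.2)
      | c0 :: c1 :: _ => (rc.1.modify c0 [] (· ++ [cell]), rc.2.modify c1 [] (· ++ [cell])))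
      = (fun rc cell => (pvUpd pvKeyRow rc.1 cell, pvUpd pvKeyColB rc.2 cell)) := by
    funext rc s
    rcases h : s.toList with _ | ⟨a, _ | ⟨b, t⟩⟩ <;>
      simp [pvUpd, pvKeyRow, pvKeyColB, h]
  rw [hsplit, PySem.List.foldl_prod_mk (f := pvUpd pvKeyRow) (g := pvUpd pvKeyColB)]
  simp only [show "ABCDEFGHI".toList = pvLetters from rfl,
    show "123456789".toList = pvDigits from rfl, pvLetters, pvDigits,
    List.map_cons, List.map_nil, pv_bucket, PySem.Dict.getD_empty, List.nil_append]
  rw [List.append_assoc]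

lemma pv_doubled (s : String) (h : pvDoubledDigit s = true) :
    ∃ c t, s.toList = c :: c :: t ∧ c ∈ pvDigits := by
  revert h
  unfold pvDoubledDigit
  rcases hl : s.toList with _ | ⟨c0, _ | ⟨c1, t⟩⟩ <;> intro h <;> simp at h
  exact ⟨c0, t, by simp [h.1], by simpa [pvDigits, h.1] using h.2⟩

-- ===== VERDICT (by name: the statements are the Claim_ definitions above) =====
theorem setUnitSet_spec : Claim_unchanged_setUnitSet := by
  intro sudoku _ hnd
  show setUnitSet sudoku = setUnitSet_alt sudoku
  rw [pv_A_canon, pv_B_canon]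
  have hall : ∀ s ∈ sudoku, pvDoubledDigit s = false := by
    intro s hs
    by_contra hb
    exact hnd (List.any_eq_true.2 ⟨s, hs, by revert hb; cases pvDoubledDigit s <;> simp⟩)
  congr 1
  congr 1
  refine List.map_congr_left fun d hd => List.filter_congr fun s hs => ?_
  have hsd := hall s hs
  rcases h : s.toList with _ | ⟨c0, _ | ⟨c1, t⟩⟩ <;>
    simp only [pvKeyColA, pvKeyColB, h]
  by_cases hc : c0 = c1
  · subst hc
    simp only [pvDoubledDigit, h, beq_self_eq_true, Bool.true_and] at hsd
    have hmem : c0 ∉ (['1','2','3','4','5','6','7','8','9'] : List Char) := by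
      simpa using hsd
    have : c0 ≠ d := fun he => hmem (he ▸ (by simpa [pvDigits] using hd))
    simp [this]
  · simp [hc]

theorem setUnitSet_changed : Claim_changed_setUnitSet := by
  unfold Claim_changed_setUnitSet; decide

theorem setUnitSet_tight : Claim_exact_setUnitSet := by
  intro sudoku _ hd heq
  rcases List.any_eq_true.1 hd with ⟨s, hs, hds⟩
  rcases pv_doubled s hds with ⟨c, t, hlist, hcdig⟩
  rw [pv_A_canon, pv_B_canon] at heq
  have hcols := List.append_cancel_right (List.append_cancel_left heq)
  have hpt := (List.map_inj_left.1 hcols) c hcdig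
  have hinB : s ∈ sudoku.filter (fun s => pvKeyColB s == some c) := by
    refine List.mem_filter.2 ⟨hs, ?_⟩
    simp [pvKeyColB, hlist]
  rw [← hpt] at hinB
  have := (List.mem_filter.1 hinB).2
  simp [pvKeyColA, hlist] at this
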